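-- pv_equiv track=rewrite | github.com/Sygit609/stephyfaqllm | backend/app/services/transcription.py | parse_markdown_to_segments
-- ===== SOURCE A (Python) =====
-- from typing import List, Dict, Optional, BinaryIO
--
-- def parse_markdown_to_segments(markdown_content: str, segment_duration: int = 120) -> List[Dict]:
--     """
--     Parse markdown file into segments without timestamps.
--     Splits content into logical chunks based on paragraphs and headings.
--
--     Args:
--         markdown_content: Raw markdown content
--         segment_duration: Target segment duration (not used for markdown, kept for consistency)
--
--     Returns:
--         List of segments without timestamps
--     """
--     lines = markdown_content.strip().split('\n')
--     segments = []
--     current_text = ""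
--
--     for line in lines:
--         line = line.strip()
--
--         # Skip empty lines
--         if not line:
--             if current_text:
--                 # Empty line signals end of paragraph
--                 segments.append({
--                     "start_time": None,
--                     "end_time": None,
--                     "text": current_text.strip()
--                 })
--                 current_text = ""
--             continue
--
--         # Heading - create segment for previous content and start fresh
--         if line.startswith('#'):
--             if current_text:
--                 segments.append({
--                     "start_time": None,
--                     "end_time": None,
--                     "text": current_text.strip()
--                 })
--             # Add heading as its own segment
--             heading_text = line.lstrip('#').strip()
--             if heading_text:
--                 segments.append({
--                     "start_time": None,
--                     "end_time": None,
--                     "text": heading_text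
--                 })
--             current_text = ""
--         else:
--             # Regular line - add to current text
--             if current_text:
--                 current_text += " " + line
--             else:
--                 current_text = line
--
--     # Add final segment if any
--     if current_text:
--         segments.append({
--             "start_time": None,
--             "end_time": None,
--             "text": current_text.strip()
--         })
--
--     return segments
-- ===== SOURCE B (Python) =====
-- def parse_markdown_to_segments(markdown_content: str, segment_duration: int = 120):
--     # Phase 1: group stripped lines into blocks of consecutive non-empty lines.
--     blocks = []
--     block = []
--     for raw in markdown_content.strip().split('\n'):
--         line = raw.strip()
--         if line:
--             block.append(line)
--         elif block:
--             blocks.append(block)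
--             block = []
--     if block:
--         blocks.append(block)
--
--     # Phase 2: within each block, flush paragraphs at headings and block end.
--     def seg(text):
--         return {"start_time": None, "end_time": None, "text": text}
--
--     segments = []
--     for block in blocks:
--         para = []
--         for line in block:
--             if line.startswith('#'):
--                 if para:
--                     segments.append(seg(" ".join(para)))
--                     para = []
--                 heading = line.lstrip('#').strip()
--                 if heading:
--                     segments.append(seg(heading))
--             else:
--                 para.append(line)
--         if para:
--             segments.append(seg(" ".join(para)))
--     return segments
-- ===== Notes on version B (the rewrite author's own statement) =====
-- stated objective: alternative
-- what changed: Replaced A's single streaming state machine (accumulating a growing string with flush-on-blank/heading) with a two-phase pipeline: first group stripped lines into blank-separated blocks, then emit heading/paragraph segments per block from a list of paragraph lines joined once at flush time.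
import Mathlib
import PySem

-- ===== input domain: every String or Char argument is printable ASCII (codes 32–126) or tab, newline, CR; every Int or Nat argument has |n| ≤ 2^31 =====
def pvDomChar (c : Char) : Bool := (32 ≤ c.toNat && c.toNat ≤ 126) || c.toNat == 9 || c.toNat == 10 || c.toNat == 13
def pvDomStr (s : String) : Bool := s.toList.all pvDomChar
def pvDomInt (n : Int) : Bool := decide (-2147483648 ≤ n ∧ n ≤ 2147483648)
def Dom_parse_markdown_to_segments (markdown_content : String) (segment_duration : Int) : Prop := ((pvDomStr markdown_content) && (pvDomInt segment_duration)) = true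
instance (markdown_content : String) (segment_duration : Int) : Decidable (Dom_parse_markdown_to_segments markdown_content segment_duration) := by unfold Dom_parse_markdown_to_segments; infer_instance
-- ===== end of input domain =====

-- B re-decomposes A's single streaming state machine into two phases (group stripped lines
-- into blank-separated blocks, then emit heading/paragraph segments per block); objective: alternative.


-- ===== PORT A =====
-- shared by both Pythons verbatim: the segment dict {"start_time": None, "end_time": None, "text": t}
def pvSeg (t : List Char) : List (String × Option String) :=
  [("start_time", none), ("end_time", none), ("text", some (String.mk t))]

-- line.lstrip('#'): hand port of str.lstrip with a char-set argument; exact (drops leading '#'s)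
def pvLstripHash (l : List Char) : List Char := l.dropWhile (fun c => c == '#')

-- A's loop body: state = (segments, current_text)
def pvAStep (st : List (List (String × Option String)) × List Char) (raw : List Char) :
    List (List (String × Option String)) × List Char :=
  let line := PySem.Chars.strip raw
  if line = [] then
    (if st.2 = [] then st else (st.1 ++ [pvSeg (PySem.Chars.strip st.2)], []))
  else if PySem.Chars.startswith line ['#'] then
    let segs := if st.2 = [] then st.1 else st.1 ++ [pvSeg (PySem.Chars.strip st.2)]
    let heading := PySem.Chars.strip (pvLstripHash line)
    ((if heading = [] then segs else segs ++ [pvSeg heading]), [])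
  else
    (st.1, if st.2 = [] then line else st.2 ++ ' ' :: line)

-- final "if current_text: append"
def pvAFin (st : List (List (String × Option String)) × List Char) :
    List (List (String × Option String)) :=
  if st.2 = [] then st.1 else st.1 ++ [pvSeg (PySem.Chars.strip st.2)]

def parse_markdown_to_segments (markdown_content : String) (segment_duration : Int) :
    List (List (String × Option String)) :=
  let lines := PySem.Chars.splitOn (PySem.Chars.strip markdown_content.toList) ['\n']
  pvAFin (lines.foldl pvAStep ([], []))

-- ===== PORT B =====
-- phase 1 loop body: state = (blocks, block)
def pvGStep (st : List (List (List Char)) × List (List Char)) (raw : List Char) :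
    List (List (List Char)) × List (List Char) :=
  let line := PySem.Chars.strip raw
  if line ≠ [] then (st.1, st.2 ++ [line])
  else if st.2 ≠ [] then (st.1 ++ [st.2], [])
  else st

def pvGFin (st : List (List (List Char)) × List (List Char)) : List (List (List Char)) :=
  if st.2 = [] then st.1 else st.1 ++ [st.2]

-- phase 2 inner loop body: state = (segments, para)
def pvBStep (st : List (List (String × Option String)) × List (List Char)) (line : List Char) :
    List (List (String × Option String)) × List (List Char) :=
  if PySem.Chars.startswith line ['#'] then
    let segs := if st.2 = [] then st.1 else st.1 ++ [pvSeg (PySem.Chars.join [' '] st.2)]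
    let heading := PySem.Chars.strip (pvLstripHash line)
    ((if heading = [] then segs else segs ++ [pvSeg heading]), [])
  else
    (st.1, st.2 ++ [line])

-- one block: inner loop then "if para: flush"
def pvBlockSegs (block : List (List Char)) : List (List (String × Option String)) :=
  let st := block.foldl pvBStep ([], [])
  if st.2 = [] then st.1 else st.1 ++ [pvSeg (PySem.Chars.join [' '] st.2)]

def parse_markdown_to_segments_alt (markdown_content : String) (segment_duration : Int) :
    List (List (String × Option String)) :=
  let lines := PySem.Chars.splitOn (PySem.Chars.strip markdown_content.toList) ['\n']
  let blocks := pvGFin (lines.foldl pvGStep ([], []))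
  blocks.foldl (fun acc b => acc ++ pvBlockSegs b) []

-- ===== PRECONDITION & SPEC =====
def Spec_parse_markdown_to_segments (markdown_content : String) (segment_duration : Int) (out : List (List (String × Option String))) : Prop := out = parse_markdown_to_segments_alt markdown_content segment_duration
instance (markdown_content : String) (segment_duration : Int) (out : List (List (String × Option String))) : Decidable (Spec_parse_markdown_to_segments markdown_content segment_duration out) := by unfold Spec_parse_markdown_to_segments; infer_instance

-- ===== CLAIM (what is proved, stated in full; the proofs are below) =====
def Claim_equal_parse_markdown_to_segments : Prop := ∀ (markdown_content : String) (segment_duration : Int), Dom_parse_markdown_to_segments markdown_content segment_duration → Spec_parse_markdown_to_segments markdown_content segment_duration (parse_markdown_to_segments markdown_content segment_duration)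

-- ===== LEMMAS AND PROOFS =====

-- "normalised stripped line": nonempty and strip-fixed on both sides
def pvNS (l : List Char) : Prop :=
  l ≠ [] ∧ PySem.Chars.lstrip l = l ∧ PySem.Chars.rstrip l = l

theorem pv_strip_of_NS {l : List Char} (h : pvNS l) : PySem.Chars.strip l = l := by
  obtain ⟨-, h1, h2⟩ := h
  simp [PySem.Chars.strip, h1, h2]

theorem pv_dw_idem (p : Char → Bool) (l : List Char) :
    (l.dropWhile p).dropWhile p = l.dropWhile p := by
  induction l with
  | nil => simp
  | cons a t ih =>
    by_cases h : p a = true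
    · simp [List.dropWhile_cons, h, ih]
    · simp only [Bool.not_eq_true] at h
      simp [List.dropWhile_cons, h]

theorem pv_head_false {p : Char → Bool} {a : Char} {t : List Char}
    (h : (a :: t).dropWhile p = a :: t) : p a = false := by
  by_contra hc
  have h' : p a = true := by simpa using hc
  rw [List.dropWhile_cons, if_pos h'] at h
  have := List.length_dropWhile_le p t
  rw [h] at this; simp at this

theorem pv_dropWhile_eq_self_append {p : Char → Bool} {l : List Char} (hne : l ≠ [])
    (hfix : l.dropWhile p = l) (r : List Char) : (l ++ r).dropWhile p = l ++ r := by
  cases l with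
  | nil => exact absurd rfl hne
  | cons a t => simp [List.dropWhile_cons, pv_head_false hfix]

theorem pv_NS_strip {raw : List Char} (h : PySem.Chars.strip raw ≠ []) :
    pvNS (PySem.Chars.strip raw) := by
  have hrstrip : PySem.Chars.rstrip (PySem.Chars.strip raw) = PySem.Chars.strip raw := by
    simp [PySem.Chars.strip, PySem.Chars.rstrip, pv_dw_idem]
  refine ⟨h, ?_, hrstrip⟩
  -- strip raw is a prefix of lstrip raw, which is dropWhile-fixed, so its head is non-space
  have hpre : PySem.Chars.strip raw <+: PySem.Chars.lstrip raw := by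
    have hsuf : (PySem.Chars.lstrip raw).reverse.dropWhile PySem.Chars.isspace <:+
        (PySem.Chars.lstrip raw).reverse := List.dropWhile_suffix _
    have := List.reverse_prefix.mpr (by simpa [List.reverse_suffix] using hsuf)
    simpa [PySem.Chars.strip, PySem.Chars.rstrip] using this
  obtain ⟨u, hu⟩ := hpre
  have hxfix : (PySem.Chars.lstrip raw).dropWhile PySem.Chars.isspace
      = PySem.Chars.lstrip raw := by
    simp [PySem.Chars.lstrip, pv_dw_idem]
  cases hs : PySem.Chars.strip raw with
  | nil => exact absurd hs h
  | cons a s =>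
    rw [hs] at hu
    rw [← hu] at hxfix
    have hxfix' : List.dropWhile PySem.Chars.isspace (a :: (s ++ u)) = a :: (s ++ u) := by
      simpa using hxfix
    have ha : PySem.Chars.isspace a = false := pv_head_false hxfix'
    simp [PySem.Chars.lstrip, List.dropWhile_cons, ha]

theorem pv_NS_append_join {x j : List Char} (hx : pvNS x) (hj : pvNS j) :
    pvNS (x ++ ' ' :: j) := by
  obtain ⟨hxne, hxl, hxr⟩ := hx
  obtain ⟨hjne, hjl, hjr⟩ := hj
  refine ⟨by simp, ?_, ?_⟩
  · exact pv_dropWhile_eq_self_append hxne hxl _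
  · show ((x ++ ' ' :: j).reverse.dropWhile PySem.Chars.isspace).reverse = _
    have hrev : (x ++ ' ' :: j).reverse = j.reverse ++ (' ' :: x.reverse) := by simp
    have hjrev : j.reverse.dropWhile PySem.Chars.isspace = j.reverse := by
      have := congrArg List.reverse hjr
      simpa [PySem.Chars.rstrip] using this
    have := pv_dropWhile_eq_self_append (by simpa using hjne) hjrev (' ' :: x.reverse)
    rw [hrev, this, ← hrev]
    simp

theorem pv_NS_join {para : List (List Char)} (hne : para ≠ [])
    (h : ∀ l ∈ para, pvNS l) : pvNS (PySem.Chars.join [' '] para) := by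
  induction para with
  | nil => exact absurd rfl hne
  | cons x rest ih =>
    cases rest with
    | nil => simpa [PySem.Chars.join_singleton] using h x (by simp)
    | cons y t =>
      have hrest := ih (by simp) (fun l hl => h l (by simp [hl]))
      have hx := h x (by simp)
      rw [PySem.Chars.join_cons_cons]
      have : x ++ [' '] ++ PySem.Chars.join [' '] (y :: t)
          = x ++ ' ' :: PySem.Chars.join [' '] (y :: t) := by simp
      rw [this]
      exact pv_NS_append_join hx hrest

theorem pv_join_concat {para : List (List Char)} (hne : para ≠ []) (l : List Char) :
    PySem.Chars.join [' '] (para ++ [l]) = PySem.Chars.join [' '] para ++ ' ' :: l := by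
  induction para with
  | nil => exact absurd rfl hne
  | cons x rest ih =>
    cases rest with
    | nil => simp [PySem.Chars.join_cons_cons, PySem.Chars.join_singleton]
    | cons y t =>
      have h2 := ih (by simp)
      have h3 : PySem.Chars.join [' '] (y :: (t ++ [l]))
          = PySem.Chars.join [' '] (y :: t) ++ ' ' :: l := by simpa using h2
      rw [show (x :: y :: t) ++ [l] = x :: y :: (t ++ [l]) from by simp,
          PySem.Chars.join_cons_cons, h3, PySem.Chars.join_cons_cons]
      simp

-- B's inner fold only appends block lines to para or clears it: pvNS is preserved
theorem pv_BStep_NS {block : List (List Char)} {s : List (List (String × Option String)) × List (List Char)}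
    (hs : ∀ l ∈ s.2, pvNS l) (hb : ∀ l ∈ block, pvNS l) :
    ∀ l ∈ (block.foldl pvBStep s).2, pvNS l := by
  induction block generalizing s with
  | nil => exact hs
  | cons x t ih =>
    refine ih ?_ (fun l hl => hb l (by simp [hl]))
    unfold pvBStep
    by_cases hh : PySem.Chars.startswith x ['#'] = true
    · simp [hh]
    · simp only [Bool.not_eq_true] at hh
      simp only [hh]
      intro l hl
      simp at hl
      rcases hl with hl | hl
      · exact hs l hl
      · subst hl; exact hb l (by simp)

-- foldl-append normal form for B's outer loop
theorem pv_procBlocks (bs : List (List (List Char))) (init : List (List (String × Option String))) :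
    bs.foldl (fun acc b => acc ++ pvBlockSegs b) init = init ++ bs.flatMap pvBlockSegs := by
  induction bs generalizing init with
  | nil => simp
  | cons b t ih => simp [ih]

-- THE MASTER LEMMA: A's streaming run from the state reconstructed out of
-- (processed blocks bs, current partial block cur) equals B's two-phase pipeline.
theorem pv_master (lines : List (List Char)) (bs : List (List (List Char)))
    (cur : List (List Char)) (hcur : ∀ l ∈ cur, pvNS l) :
    pvAFin (lines.foldl pvAStep
      (bs.flatMap pvBlockSegs ++ (cur.foldl pvBStep ([], [])).1,
       PySem.Chars.join [' '] (cur.foldl pvBStep ([], [])).2))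
    = (pvGFin (lines.foldl pvGStep (bs, cur))).flatMap pvBlockSegs := by
  induction lines generalizing bs cur with
  | nil =>
    have hpara : ∀ l ∈ (cur.foldl pvBStep ([], [])).2, pvNS l :=
      pv_BStep_NS (by simp) hcur
    simp only [List.foldl_nil]
    unfold pvAFin pvGFin
    by_cases hp : (cur.foldl pvBStep ([], [])).2 = []
    · rw [if_pos (by simp [hp, PySem.Chars.join_nil])]
      by_cases hc : cur = []
      · subst hc; simp [pvBStep]
      · rw [if_neg hc]
        simp [pvBlockSegs, hp]
    · have hjoin := pv_NS_join hp hpara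
      rw [if_neg hjoin.1]
      have hcne : cur ≠ [] := by
        intro hc; subst hc; simp at hp
      rw [if_neg hcne]
      rw [pv_strip_of_NS hjoin]
      simp [pvBlockSegs, hp]
  | cons raw rest ih =>
    have hpara : ∀ l ∈ (cur.foldl pvBStep ([], [])).2, pvNS l :=
      pv_BStep_NS (by simp) hcur
    simp only [List.foldl_cons]
    rcases hist : cur.foldl pvBStep ([], []) with ⟨S, P⟩
    rw [hist] at hpara
    simp only [hist]
    by_cases hline : PySem.Chars.strip raw = []
    · -- blank line
      by_cases hp : P = []
      · subst hp
        have hA : pvAStep (bs.flatMap pvBlockSegs ++ S, PySem.Chars.join [' '] []) raw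
            = (bs.flatMap pvBlockSegs ++ S, PySem.Chars.join [' '] []) := by
          simp [pvAStep, hline, PySem.Chars.join_nil]
        rw [hA]
        by_cases hc : cur = []
        · have hG : pvGStep (bs, cur) raw = (bs, cur) := by
            simp [pvGStep, hline, hc]
          rw [hG]
          have := ih bs cur hcur
          rw [hist] at this
          exact this
        · have hG : pvGStep (bs, cur) raw = (bs ++ [cur], []) := by
            simp [pvGStep, hline, hc]
          rw [hG]
          have := ih (bs ++ [cur]) [] (by simp)
          simp only [List.foldl_nil] at this
          rw [← this]
          congr 2
          simp [pvBlockSegs, hist, List.flatMap_append]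
      · have hjoin := pv_NS_join hp hpara
        have hcne : cur ≠ [] := by
          intro hc; subst hc; simp [pvBStep] at hist; exact hp hist.2
        have hA : pvAStep (bs.flatMap pvBlockSegs ++ S, PySem.Chars.join [' '] P) raw
            = ((bs.flatMap pvBlockSegs ++ S) ++ [pvSeg (PySem.Chars.join [' '] P)], []) := by
          simp [pvAStep, hline, hjoin.1, pv_strip_of_NS hjoin]
        have hG : pvGStep (bs, cur) raw = (bs ++ [cur], []) := by
          simp [pvGStep, hline, hcne]
        rw [hA, hG]
        have := ih (bs ++ [cur]) [] (by simp)
        simp only [List.foldl_nil] at this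
        rw [show PySem.Chars.join [' '] ([] : List (List Char)) = [] from PySem.Chars.join_nil _] at this
        rw [← this]
        congr 2
        simp [pvBlockSegs, hist, hp, List.flatMap_append]
    · -- non-blank line: B appends it to the block either way
      have hG : pvGStep (bs, cur) raw = (bs, cur ++ [PySem.Chars.strip raw]) := by
        simp [pvGStep, hline]
      rw [hG]
      have hcur' : ∀ l ∈ cur ++ [PySem.Chars.strip raw], pvNS l := by
        intro l hl
        rcases List.mem_append.mp hl with hl | hl
        · exact hcur l hl
        · simp at hl; subst hl; exact pv_NS_strip hline
      have hist' : (cur ++ [PySem.Chars.strip raw]).foldl pvBStep ([], [])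
          = pvBStep (S, P) (PySem.Chars.strip raw) := by
        rw [List.foldl_append, hist]; rfl
      have hIH := ih bs (cur ++ [PySem.Chars.strip raw]) hcur'
      rw [hist'] at hIH
      by_cases hh : PySem.Chars.startswith (PySem.Chars.strip raw) ['#'] = true
      · -- heading line
        have hstep : pvBStep (S, P) (PySem.Chars.strip raw)
            = ((if PySem.Chars.strip (pvLstripHash (PySem.Chars.strip raw)) = []
                then (if P = [] then S else S ++ [pvSeg (PySem.Chars.join [' '] P)])
                else (if P = [] then S else S ++ [pvSeg (PySem.Chars.join [' '] P)])
                     ++ [pvSeg (PySem.Chars.strip (pvLstripHash (PySem.Chars.strip raw)))]), []) := by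
          simp [pvBStep, hh]
        have hA : pvAStep (bs.flatMap pvBlockSegs ++ S, PySem.Chars.join [' '] P) raw
            = (bs.flatMap pvBlockSegs ++ (pvBStep (S, P) (PySem.Chars.strip raw)).1, []) := by
          rw [hstep]
          unfold pvAStep
          by_cases hp : P = []
          · subst hp
            simp [hline, hh, PySem.Chars.join_nil, apply_ite (fun t => (bs.flatMap pvBlockSegs) ++ t)]
          · have hjoin := pv_NS_join hp hpara
            simp [hline, hh, hp, hjoin.1, pv_strip_of_NS hjoin,
                  apply_ite (fun t => (bs.flatMap pvBlockSegs) ++ t)]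
        rw [hA]
        have hp2 : (pvBStep (S, P) (PySem.Chars.strip raw)).2 = [] := by
          simp [pvBStep, hh]
        rw [hp2] at hIH
        rw [show PySem.Chars.join [' '] ([] : List (List Char)) = [] from PySem.Chars.join_nil _] at hIH
        exact hIH
      · -- regular text line
        have hA : pvAStep (bs.flatMap pvBlockSegs ++ S, PySem.Chars.join [' '] P) raw
            = (bs.flatMap pvBlockSegs ++ S,
               PySem.Chars.join [' '] (P ++ [PySem.Chars.strip raw])) := by
          unfold pvAStep
          simp only [Bool.not_eq_true] at hh
          simp only [if_neg hline, hh, Bool.false_eq_true, if_false]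
          by_cases hp : P = []
          · subst hp
            simp [PySem.Chars.join_nil, PySem.Chars.join_singleton]
          · have hjoin := pv_NS_join hp hpara
            simp [hjoin.1, pv_join_concat hp]
        rw [hA]
        have hp2 : pvBStep (S, P) (PySem.Chars.strip raw)
            = (S, P ++ [PySem.Chars.strip raw]) := by
          simp only [Bool.not_eq_true] at hh
          simp [pvBStep, hh]
        rw [hp2] at hIH
        exact hIH

-- ===== VERDICT (by name: the statement is the Claim_ definition above) =====
theorem parse_markdown_to_segments_spec : Claim_equal_parse_markdown_to_segments := by
  intro md sd _
  unfold Spec_parse_markdown_to_segments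
  unfold parse_markdown_to_segments parse_markdown_to_segments_alt
  have := pv_master (PySem.Chars.splitOn (PySem.Chars.strip md.toList) ['\n']) [] [] (by simp)
  simp only [List.foldl_nil, List.flatMap_nil, List.nil_append, PySem.Chars.join_nil] at this
  rw [pv_procBlocks]
  simpa using this
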